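-- pv_equiv track=rewrite | github.com/emliunix/bub | systemf/src/systemf/surface/lexer.py | _process_escape_sequences
-- ===== SOURCE A (Python) =====
-- def _process_escape_sequences(s: str) -> str:
--     """Process escape sequences in a string literal.
--
--     Handles common escape sequences: \\, \", \n, \t, \r, \b, \f.
--
--     Args:
--         s: The raw string content (without quotes)
--
--     Returns:
--         The string with escape sequences processed
--     """
--     result = []
--     i = 0
--     while i < len(s):
--         if s[i] == "\\" and i + 1 < len(s):
--             next_char = s[i + 1]
--             if next_char == "\\":
--                 result.append("\\")
--             elif next_char == '"':
--                 result.append('"')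
--             elif next_char == "n":
--                 result.append("\n")
--             elif next_char == "t":
--                 result.append("\t")
--             elif next_char == "r":
--                 result.append("\r")
--             elif next_char == "b":
--                 result.append("\b")
--             elif next_char == "f":
--                 result.append("\f")
--             else:
--                 # Unknown escape sequence, keep as-is
--                 result.append(s[i : i + 2])
--             i += 2
--         else:
--             result.append(s[i])
--             i += 1
--     return "".join(result)
-- ===== SOURCE B (Python) =====
-- _ESC = {"\\": "\\", '"': '"', "n": "\n", "t": "\t", "r": "\r", "b": "\b", "f": "\f"}
--
--
-- def _process_escape_sequences(s: str) -> str: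
--     """Process escape sequences by splitting on backslash and rejoining.
--
--     s.split("\\") isolates every backslash; each later part starts right
--     after a backslash, so its first character is the escaped one. An empty
--     part means the backslash was followed by another backslash (whose part
--     is then literal text) or was a trailing lone backslash.
--     """
--     parts = s.split("\\")
--     out = [parts[0]]
--     i = 1
--     n = len(parts)
--     while i < n:
--         p = parts[i]
--         if p == "":
--             out.append("\\")
--             if i + 1 < n:
--                 i += 1
--                 out.append(parts[i])
--         else:
--             out.append(_ESC.get(p[0], "\\" + p[0]))
--             out.append(p[1:])
--         i += 1
--     return "".join(out)
-- ===== Notes on version B (the rewrite author's own statement) =====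
-- stated objective: faster
-- what changed: Instead of walking the string by index with an eight-way elif chain, B splits the string on backslash with str.split and reconstructs the result from the segment list: each later segment's first character is the escaped one (looked up in a table), and an empty segment marks an escaped or trailing backslash; the per-character work moves into C-level split/join.
import Mathlib
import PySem

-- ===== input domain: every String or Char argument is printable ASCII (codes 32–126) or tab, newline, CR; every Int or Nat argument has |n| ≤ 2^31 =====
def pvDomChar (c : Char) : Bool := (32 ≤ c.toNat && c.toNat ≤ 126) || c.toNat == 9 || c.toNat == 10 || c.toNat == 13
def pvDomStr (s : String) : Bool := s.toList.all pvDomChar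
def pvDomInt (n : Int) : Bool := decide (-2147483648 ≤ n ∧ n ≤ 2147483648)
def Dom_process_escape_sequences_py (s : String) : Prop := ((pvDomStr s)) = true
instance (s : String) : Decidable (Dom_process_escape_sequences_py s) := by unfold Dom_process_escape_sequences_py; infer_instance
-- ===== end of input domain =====

-- B replaces A's index-walking elif chain by split-on-backslash plus reconstruction of
-- the segment list (measurably faster in Python: bulk split/join); same values everywhere.

-- ===== PORT A =====
-- A walks the string by index; ported as structural recursion over the character list,
-- with the same branch chain in the same order.
def pvA_loop : List Char → List Char
  | [] => []
  | c :: rest =>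
    if c = '\\' then
      -- "i + 1 < len(s)" : there is a next character
      match rest with
      | n :: rest' =>
        (if n = '\\' then ['\\']
         else if n = '"' then ['"']
         else if n = 'n' then ['\n']
         else if n = 't' then ['\t']
         else if n = 'r' then ['\r']
         else if n = 'b' then [Char.ofNat 8]
         else if n = 'f' then [Char.ofNat 12]
         else [c, n])  -- unknown escape: keep s[i:i+2]
         ++ pvA_loop rest'
      | [] => c :: pvA_loop []
    else c :: pvA_loop rest

def process_escape_sequences_py (s : String) : String :=
  String.ofList (pvA_loop s.toList)

-- ===== PORT B =====
-- B's escape table (module-level _ESC dict in Source B)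
def pvEsc : PySem.Dict Char (List Char) :=
  PySem.Dict.mk [('\\', ['\\']), ('"', ['"']), ('n', ['\n']), ('t', ['\t']),
                 ('r', ['\r']), ('b', [Char.ofNat 8]), ('f', [Char.ofNat 12])]

-- the while loop over parts[1:]: each part follows a backslash; an empty part is an
-- escaped (or trailing) backslash, whose following part is then appended literally
def pvB_rebuild : List (List Char) → List Char
  | [] => []
  | [] :: rest =>
    match rest with
    | [] => ['\\']                                  -- trailing lone backslash
    | q :: rest' => '\\' :: (q ++ pvB_rebuild rest')
  | (c :: t) :: rest => (pvEsc.getD c ['\\', c]) ++ t ++ pvB_rebuild rest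

def process_escape_sequences_py_alt (s : String) : String :=
  match PySem.Chars.splitOn s.toList ['\\'] with
  | p0 :: rest => String.ofList (p0 ++ pvB_rebuild rest)
  | [] => ""   -- unreachable: str.split never returns an empty list

-- ===== PRECONDITION & SPEC =====
def Spec_process_escape_sequences_py (s : String) (out : String) : Prop := out = process_escape_sequences_py_alt s
instance (s : String) (out : String) : Decidable (Spec_process_escape_sequences_py s out) := by unfold Spec_process_escape_sequences_py; infer_instance

-- ===== CLAIM (what is proved, stated in full; the proofs are below) =====
def Claim_equal_process_escape_sequences_py : Prop := ∀ (s : String), Dom_process_escape_sequences_py s → Spec_process_escape_sequences_py s (process_escape_sequences_py s)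

-- ===== LEMMAS AND PROOFS =====

-- structural characterisation of split-on-backslash: first segment and later segments
def pvSplit : List Char → List Char × List (List Char)
  | [] => ([], [])
  | c :: rest =>
    let pr := pvSplit rest
    if c = '\\' then ([], pr.1 :: pr.2) else (c :: pr.1, pr.2)

theorem pv_go_eq : ∀ (fuel : Nat) (l cur : List Char) (acc : List (List Char)),
    l.length < fuel →
    PySem.Chars.splitOn.go ['\\'] fuel l cur acc
      = acc.reverse ++ ((cur.reverse ++ (pvSplit l).1) :: (pvSplit l).2) := by
  intro fuel
  induction fuel with
  | zero => intro l cur acc h; omega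
  | succ f ih =>
    intro l cur acc h
    cases l with
    | nil => simp [PySem.Chars.splitOn.go, pvSplit]
    | cons c rest =>
      by_cases hc : c = '\\'
      · subst hc
        rw [PySem.Chars.splitOn.go]
        simp only [List.isPrefixOf, beq_self_eq_true, Bool.true_and, if_true,
          List.length_cons, List.length_nil, List.drop_succ_cons, List.drop_zero]
        rw [ih rest [] (cur.reverse :: acc) (by simpa using Nat.lt_of_succ_lt_succ h)]
        simp [pvSplit]
      · rw [PySem.Chars.splitOn.go]
        have : (['\\'].isPrefixOf (c :: rest)) = false := by
          simp [List.isPrefixOf]; exact fun hh => absurd hh.symm hc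
        rw [this]
        simp only [if_false, Bool.false_eq_true]
        rw [ih rest (c :: cur) acc (by simpa using Nat.lt_of_succ_lt_succ h)]
        simp [pvSplit, hc]

theorem pv_splitOn_eq (l : List Char) :
    PySem.Chars.splitOn l ['\\'] = (pvSplit l).1 :: (pvSplit l).2 := by
  unfold PySem.Chars.splitOn
  rw [pv_go_eq (l.length + 1) l [] [] (Nat.lt_succ_self _)]
  simp

-- the elif chain of A equals B's dict lookup with the unknown-escape default
set_option maxHeartbeats 1000000 in
theorem pv_esc_eq (n : Char) :
    (if n = '\\' then ['\\']
     else if n = '"' then ['"']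
     else if n = 'n' then ['\n']
     else if n = 't' then ['\t']
     else if n = 'r' then ['\r']
     else if n = 'b' then [Char.ofNat 8]
     else if n = 'f' then [Char.ofNat 12]
     else ['\\', n]) = pvEsc.getD n ['\\', n] := by
  simp only [pvEsc, PySem.Dict.getD_eq_get?_getD, PySem.Dict.get?_mk_cons, beq_iff_eq]
  split_ifs <;> simp_all [PySem.Dict.get?, eq_comm]

theorem pv_loop_eq : ∀ l : List Char,
    pvA_loop l = (pvSplit l).1 ++ pvB_rebuild (pvSplit l).2 := by
  intro l
  induction l using pvA_loop.induct with
  | case1 => rfl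
  | case2 n rest' ih =>
    -- '\\' :: n :: rest'
    simp only [pvA_loop, if_true]
    rw [pv_esc_eq, ih]
    by_cases hn : n = '\\'
    · subst hn
      simp [pvSplit, pvB_rebuild, pvEsc, PySem.Dict.getD_eq_get?_getD, PySem.Dict.get?]
    · simp [pvSplit, hn, pvB_rebuild, List.append_assoc]
  | case3 =>
    -- '\\' :: []
    simp [pvA_loop, pvSplit, pvB_rebuild]
  | case4 c rest hc ih =>
    cases rest with
    | nil => simp [pvA_loop, pvSplit, pvB_rebuild, hc]
    | cons m t =>
      rw [pvA_loop.eq_2, if_neg hc, ih]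
      simp [pvSplit, hc]

-- ===== VERDICT (by name: the statement is the Claim_ definition above) =====
theorem process_escape_sequences_py_spec : Claim_equal_process_escape_sequences_py := by
  intro s _
  unfold Spec_process_escape_sequences_py process_escape_sequences_py process_escape_sequences_py_alt
  rw [pv_splitOn_eq, pv_loop_eq]
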